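-- pv_equiv track=rewrite | github.com/numworks/epsilon | tools/device/elf_size_tree.py | split_namespace_and_symbol
-- ===== SOURCE A (Python) =====
-- def find_at_depth_zero(s, start, substring):
--     """
--     Find the first occurrence of `substring` at depth zero in `s` starting from `start`.
--     Depth zero means no nested parentheses or brackets.
--     """
--     depth = 0
--     i = start
--
--     while i < len(s):
--         if depth == 0 and s.startswith(substring, i):
--             return i
--
--         if s[i] == "(" or s[i] == "{" or s[i] == "[" or s[i] == "<":
--             depth += 1
--         elif s[i] == ")" or s[i] == "}" or s[i] == "]" or s[i] == ">":
--             depth -= 1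
--
--         i += 1
--
--     return None
--
-- def split_namespace_and_symbol(symbol_str):
--     """
--     "A::B::C<D::E, F>::(anonymous namespace)::G()"
--       -> (["A", "B", "C<D::E, F>", "(anonymous namespace)"], "G()")
--     """
--     namespaces = []
--     symbol_start = 0
--     i = find_at_depth_zero(symbol_str, 0, "::")
--     while i is not None:
--         namespaces.append(symbol_str[symbol_start:i])
--         symbol_start = i + 2  # skip the "::"
--         i = find_at_depth_zero(symbol_str, symbol_start, "::")
--     return (namespaces, symbol_str[symbol_start:])
-- ===== SOURCE B (Python) =====
-- def split_namespace_and_symbol(symbol_str):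
--     """
--     "A::B::C<D::E, F>::(anonymous namespace)::G()"
--       -> (["A", "B", "C<D::E, F>", "(anonymous namespace)"], "G()")
--
--     Staged: (1) precompute the bracket-depth prefix array, (2) select the
--     non-overlapping depth-zero "::" cut positions, (3) slice at the cuts.
--     """
--     n = len(symbol_str)
--     depths = []
--     depth = 0
--     for c in symbol_str:
--         depths.append(depth)
--         if c in "({[<":
--             depth += 1
--         elif c in ")}]>":
--             depth -= 1
--     cuts = []
--     last = -2
--     for i in range(n - 1):
--         if i >= last + 2 and depths[i] == 0 and symbol_str[i] == ':' and symbol_str[i + 1] == ':':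
--             cuts.append(i)
--             last = i
--     parts = []
--     prev = 0
--     for i in cuts:
--         parts.append(symbol_str[prev:i])
--         prev = i + 2
--     return (parts, symbol_str[prev:])
-- ===== Notes on version B (the rewrite author's own statement) =====
-- stated objective: alternative
-- what changed: Replaced A's outer loop that restarts the scanning helper find_at_depth_zero per segment (an on-line scan interleaving depth tracking, searching and splitting) with three separate staged passes: precompute a bracket-depth prefix array, then select the non-overlapping depth-zero '::' cut positions from it, then slice the string at those cuts.
import Mathlib
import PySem

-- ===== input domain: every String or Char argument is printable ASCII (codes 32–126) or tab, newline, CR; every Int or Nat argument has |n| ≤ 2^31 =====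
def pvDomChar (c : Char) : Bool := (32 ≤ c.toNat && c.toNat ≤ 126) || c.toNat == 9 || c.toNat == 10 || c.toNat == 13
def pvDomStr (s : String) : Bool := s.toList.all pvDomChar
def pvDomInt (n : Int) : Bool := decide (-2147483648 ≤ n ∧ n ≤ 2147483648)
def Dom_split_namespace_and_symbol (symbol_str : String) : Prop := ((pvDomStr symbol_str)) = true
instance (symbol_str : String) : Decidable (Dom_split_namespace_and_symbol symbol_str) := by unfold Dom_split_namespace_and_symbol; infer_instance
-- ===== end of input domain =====

-- B replaces A's outer loop that restarts the scanning helper per segment with three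
-- staged passes: a bracket-depth prefix array, selection of the non-overlapping
-- depth-zero "::" cut positions, then slicing at those cuts. Same O(n) cost.
-- Loops are ported as structural recursion on a fuel that bounds the remaining
-- iterations (exact: the fuel never runs out before the Python loop condition fails).

-- shared char classification (both Pythons test the same bracket characters)
def pvStep (d : Int) (c : Char) : Int :=
  if c = '(' ∨ c = '{' ∨ c = '[' ∨ c = '<' then d + 1
  else if c = ')' ∨ c = '}' ∨ c = ']' ∨ c = '>' then d - 1
  else d

-- ===== PORT A =====
-- s.startswith("::", i): exact — Python requires the whole "::" to fit at position i.
def pvStarts2 (l : List Char) (i : Nat) : Bool := (l.drop i).take 2 == [':', ':']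

-- the while-loop of find_at_depth_zero (substring fixed to "::", its only call site);
-- fuel = l.length - i bounds the iterations exactly (i increases by 1 per iteration)
def findADZGo (l : List Char) (fuel : Nat) (i : Nat) (depth : Int) : Option Nat :=
  match fuel with
  | 0 => none
  | fuel + 1 =>
    if i < l.length then
      if depth = 0 ∧ pvStarts2 l i then some i
      else findADZGo l fuel (i + 1) (pvStep depth (l.getD i ' '))
    else none

def find_at_depth_zero (l : List Char) (start : Nat) : Option Nat :=
  findADZGo l (l.length - start) start 0

-- the while-loop of split_namespace_and_symbol (state: namespaces, symbol_start, i);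
-- fuel = l.length + 1 bounds the iterations (symbol_start grows by ≥ 2 per iteration)
def splitGo (l : List Char) (fuel : Nat) (acc : List String) (start : Nat) :
    Option Nat → List String × String
  | none => (acc, String.ofList (l.drop start))
  | some i =>
    match fuel with
    | 0 => (acc, String.ofList (l.drop start))  -- unreachable with the stated fuel
    | fuel + 1 =>
      splitGo l fuel (acc ++ [String.ofList ((l.drop start).take (i - start))]) (i + 2)
        (find_at_depth_zero l (i + 2))

def split_namespace_and_symbol (symbol_str : String) : List String × String :=
  let l := symbol_str.toList
  splitGo l (l.length + 1) [] 0 (find_at_depth_zero l 0)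

-- ===== PORT B =====
-- stage 1: the depth prefix array ('for c in symbol_str: depths.append(depth); …')
def depthsGo : List Char → Int → List Int
  | [], _ => []
  | c :: cs, d => d :: depthsGo cs (pvStep d c)

-- stage 2: 'for i in range(n - 1): …' selecting the cuts; fuel = (n-1) - i exactly
def cutsGo (l : List Char) (depths : List Int) (fuel : Nat) (i : Nat) (last : Int)
    (acc : List Nat) : List Nat :=
  match fuel with
  | 0 => acc
  | fuel + 1 =>
    if i < l.length - 1 then
      if (last + 2 ≤ (i : Int)) ∧ depths.getD i 0 = 0 ∧ l.getD i ' ' = ':' ∧ l.getD (i + 1) ' ' = ':' then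
        cutsGo l depths fuel (i + 1) (i : Int) (acc ++ [i])
      else cutsGo l depths fuel (i + 1) last acc
    else acc

-- stage 3: 'for i in cuts: parts.append(symbol_str[prev:i]); prev = i + 2'
def partsGo (l : List Char) : List Nat → Nat → List String → List String × String
  | [], prev, acc => (acc, String.ofList (l.drop prev))
  | j :: cs, prev, acc =>
      partsGo l cs (j + 2) (acc ++ [String.ofList ((l.drop prev).take (j - prev))])

def split_namespace_and_symbol_alt (symbol_str : String) : List String × String :=
  let l := symbol_str.toList
  let depths := depthsGo l 0
  let cuts := cutsGo l depths (l.length - 1) 0 (-2) []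
  partsGo l cuts 0 []

-- ===== PRECONDITION & SPEC =====
def Spec_split_namespace_and_symbol (symbol_str : String) (out : List String × String) : Prop := out = split_namespace_and_symbol_alt symbol_str
instance (symbol_str : String) (out : List String × String) : Decidable (Spec_split_namespace_and_symbol symbol_str out) := by unfold Spec_split_namespace_and_symbol; infer_instance

-- ===== CLAIM (what is proved, stated in full; the proofs are below) =====
def Claim_equal_split_namespace_and_symbol : Prop := ∀ (symbol_str : String), Dom_split_namespace_and_symbol symbol_str → Spec_split_namespace_and_symbol symbol_str (split_namespace_and_symbol symbol_str)

-- ===== LEMMAS AND PROOFS =====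

-- the global bracket depth before index i
def depthAt (l : List Char) (i : Nat) : Int := (l.take i).foldl pvStep 0

-- canonical-fuel view of stage 2 from index i
def cutsC (l : List Char) (i : Nat) (last : Int) : List Nat :=
  cutsGo l (depthsGo l 0) (l.length - 1 - i) i last []

theorem pvStarts2_fit {l : List Char} {i : Nat} (h : pvStarts2 l i = true) :
    i + 2 ≤ l.length := by
  unfold pvStarts2 at h
  have he : (l.drop i).take 2 = [':', ':'] := beq_iff_eq.mp h
  have hlen := congrArg List.length he
  simp [List.length_take, List.length_drop] at hlen
  omega

theorem depthAt_zero (l : List Char) : depthAt l 0 = 0 := rfl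

theorem depthAt_succ (l : List Char) (i : Nat) (hi : i < l.length) :
    depthAt l (i + 1) = pvStep (depthAt l i) (l.getD i ' ') := by
  unfold depthAt
  have h : l.take (i + 1) = l.take i ++ [l[i]] := by
    rw [List.take_add_one, List.getElem?_eq_getElem hi]
    rfl
  rw [h, List.foldl_append]
  simp [List.getD, List.getElem?_eq_getElem hi]

theorem depthsGo_getD (l : List Char) :
    ∀ (d : Int) (i : Nat), i < l.length →
      (depthsGo l d).getD i 0 = (l.take i).foldl pvStep d := by
  induction l with
  | nil => intro d i h; simp at h
  | cons c cs ih =>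
    intro d i h
    cases i with
    | zero => simp [depthsGo]
    | succ i =>
      simp only [depthsGo, List.getD_cons_succ, List.take_succ_cons, List.foldl_cons]
      exact ih (pvStep d c) i (by simpa using h)

theorem depths_eq_depthAt (l : List Char) (i : Nat) (hi : i < l.length) :
    (depthsGo l 0).getD i 0 = depthAt l i :=
  depthsGo_getD l 0 i hi

theorem starts2_iff (l : List Char) (i : Nat) (hi : i < l.length) :
    pvStarts2 l i = true ↔ (l.getD i ' ' = ':' ∧ l.getD (i + 1) ' ' = ':') := by
  unfold pvStarts2
  by_cases h1 : i + 1 < l.length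
  · rw [List.drop_eq_getElem_cons hi, List.drop_eq_getElem_cons h1]
    simp only [show (2 : Nat) = 0 + 1 + 1 from rfl, List.take_succ_cons, List.take_zero]
    simp [List.getD, List.getElem?_eq_getElem hi, List.getElem?_eq_getElem h1]
  · have hd : l.drop (i + 1) = ([] : List Char) := List.drop_eq_nil_of_le (by omega)
    have h2 : l[i + 1]? = none := List.getElem?_eq_none_iff.mpr (by omega)
    rw [List.drop_eq_getElem_cons hi, hd]
    simp [List.getD, List.getElem?_eq_getElem hi, h2]

theorem pvStep_colon (d : Int) : pvStep d ':' = d := by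
  unfold pvStep
  rw [if_neg (by decide), if_neg (by decide)]

theorem cutsGo_acc (l : List Char) (ds : List Int) :
    ∀ (fuel i : Nat) (last : Int) (acc : List Nat),
      cutsGo l ds fuel i last acc = acc ++ cutsGo l ds fuel i last [] := by
  intro fuel
  induction fuel with
  | zero => intro i last acc; simp [cutsGo]
  | succ fuel ih =>
    intro i last acc
    rw [cutsGo, cutsGo]
    by_cases hi : i < l.length - 1
    · simp only [if_pos hi]
      by_cases hc : (last + 2 ≤ (i : Int)) ∧ ds.getD i 0 = 0 ∧ l.getD i ' ' = ':' ∧ l.getD (i + 1) ' ' = ':'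
      · simp only [if_pos hc]
        rw [ih (i + 1) (i : Int) (acc ++ [i]), ih (i + 1) (i : Int) ([] ++ [i])]
        simp
      · simp only [if_neg hc]
        rw [ih (i + 1) last acc]
    · simp [hi]

-- the flat-pass helper (proof device): A's scan-and-split expressed as one pass
def altGo (l : List Char) (fuel : Nat) (i : Nat) (depth : Int) (start : Nat)
    (acc : List String) : List String × String :=
  match fuel with
  | 0 => (acc, String.ofList (l.drop start))
  | fuel + 1 =>
    if i < l.length then
      if depth = 0 ∧ pvStarts2 l i then
        altGo l fuel (i + 2) depth (i + 2)
          (acc ++ [String.ofList ((l.drop start).take (i - start))])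
      else altGo l fuel (i + 1) (pvStep depth (l.getD i ' ')) start acc
    else (acc, String.ofList (l.drop start))

-- A's outer-loop/inner-scan pair equals the flat pass
theorem altGo_eq_splitGo (l : List Char) :
    ∀ (fa : Nat) (fs i : Nat) (d : Int) (start : Nat) (acc : List String),
      l.length - i ≤ fa → l.length ≤ 2 * fs + i →
      altGo l fa i d start acc =
        splitGo l fs acc start (findADZGo l (l.length - i) i d) := by
  intro fa
  induction fa with
  | zero =>
    intro fs i d start acc hfa _
    have hi : ¬ i < l.length := by omega
    have h0 : l.length - i = 0 := by omega
    rw [altGo, h0, findADZGo, splitGo]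
  | succ fa ih =>
    intro fs i d start acc hfa hfs
    rw [altGo]
    by_cases hi : i < l.length
    · have h1 : l.length - i = (l.length - (i + 1)) + 1 := by omega
      rw [h1, findADZGo]
      simp only [if_pos hi]
      by_cases hc : d = 0 ∧ pvStarts2 l i = true
      · simp only [if_pos hc]
        have hfit : i + 2 ≤ l.length := pvStarts2_fit hc.2
        obtain ⟨fs', rfl⟩ : ∃ fs', fs = fs' + 1 := ⟨fs - 1, by omega⟩
        rw [splitGo]
        rw [ih fs' (i + 2) d (i + 2) _ (by omega) (by omega)]
        rw [hc.1]
        rfl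
      · simp only [if_neg hc]
        exact ih fs (i + 1) _ start acc (by omega) (by omega)
    · have h0 : l.length - i = 0 := by omega
      rw [h0, findADZGo, splitGo]
      simp [hi]

theorem cutsC_stop (l : List Char) (i : Nat) (last : Int) (h : l.length - 1 ≤ i) :
    cutsC l i last = [] := by
  unfold cutsC
  have h0 : l.length - 1 - i = 0 := by omega
  rw [h0, cutsGo]

theorem cutsC_skip_after (l : List Char) (i : Nat) :
    cutsC l (i + 1) (i : Int) = cutsC l (i + 2) (i : Int) := by
  by_cases hi : i + 1 < l.length - 1
  · unfold cutsC
    have h1 : l.length - 1 - (i + 1) = (l.length - 1 - (i + 2)) + 1 := by omega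
    rw [h1, cutsGo]
    simp only [if_pos hi]
    have hne : ¬ ((i : Int) + 2 ≤ ((i + 1 : Nat) : Int) ∧ (depthsGo l 0).getD (i+1) 0 = 0 ∧
        l.getD (i+1) ' ' = ':' ∧ l.getD (i + 1 + 1) ' ' = ':') := by
      push_cast; omega
    simp only [if_neg hne]
  · rw [cutsC_stop l (i + 1) _ (by omega), cutsC_stop l (i + 2) _ (by omega)]

-- the flat pass equals B's staged cut-selection + slicing
theorem altGo_eq_staged (l : List Char) :
    ∀ (fa i start : Nat) (acc : List String),
      l.length - i ≤ fa → start ≤ i →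
      altGo l fa i (depthAt l i) start acc =
        partsGo l (cutsC l i ((start : Int) - 2)) start acc := by
  intro fa
  induction fa with
  | zero =>
    intro i start acc hfa hsi
    rw [altGo, cutsC_stop l i _ (by omega), partsGo]
  | succ fa ih =>
    intro i start acc hfa hsi
    rw [altGo]
    by_cases hi : i < l.length
    · by_cases hc : depthAt l i = 0 ∧ pvStarts2 l i = true
      · simp only [if_pos hi, if_pos hc]
        have hfit : i + 2 ≤ l.length := pvStarts2_fit hc.2
        have hchars := (starts2_iff l i hi).mp hc.2
        -- the cut fires at i
        have hcut : cutsC l i ((start : Int) - 2) = i :: cutsC l (i + 2) (i : Int) := by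
          have hi1 : i < l.length - 1 := by omega
          unfold cutsC
          have h1 : l.length - 1 - i = (l.length - 1 - (i + 1)) + 1 := by omega
          rw [h1, cutsGo]
          simp only [if_pos hi1]
          have hcond : ((start : Int) - 2 + 2 ≤ (i : Int)) ∧ (depthsGo l 0).getD i 0 = 0 ∧
              l.getD i ' ' = ':' ∧ l.getD (i + 1) ' ' = ':' := by
            refine ⟨by omega, ?_, hchars.1, hchars.2⟩
            rw [depths_eq_depthAt l i hi]; exact hc.1
          simp only [if_pos hcond]
          rw [cutsGo_acc l _ _ (i + 1) (i : Int) ([] ++ [i])]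
          have := cutsC_skip_after l i
          unfold cutsC at this
          rw [this]
          simp
        rw [hcut, partsGo]
        -- depth stays 0 across the two ':' characters
        have hd2 : depthAt l (i + 2) = depthAt l i := by
          rw [depthAt_succ l (i + 1) (by omega), depthAt_succ l i hi,
            hchars.1, hchars.2, pvStep_colon, pvStep_colon]
        have hrec := ih (i + 2) (i + 2)
          (acc ++ [String.ofList ((l.drop start).take (i - start))]) (by omega) (by omega)
        rw [hd2, hc.1] at hrec
        have hcast : (((i + 2 : Nat)) : Int) - 2 = (i : Int) := by push_cast; ring
        rw [hcast] at hrec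
        rw [hc.1]
        exact hrec
      · simp only [if_pos hi, if_neg hc]
        have hstep : pvStep (depthAt l i) (l.getD i ' ') = depthAt l (i + 1) :=
          (depthAt_succ l i hi).symm
        rw [hstep, ih (i + 1) start acc (by omega) (by omega)]
        -- the candidate at i does not fire
        have hsame : cutsC l i ((start : Int) - 2) = cutsC l (i + 1) ((start : Int) - 2) := by
          by_cases hi1 : i < l.length - 1
          · unfold cutsC
            have h1 : l.length - 1 - i = (l.length - 1 - (i + 1)) + 1 := by omega
            rw [h1, cutsGo]
            simp only [if_pos hi1]
            have hne : ¬ (((start : Int) - 2 + 2 ≤ (i : Int)) ∧ (depthsGo l 0).getD i 0 = 0 ∧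
                l.getD i ' ' = ':' ∧ l.getD (i + 1) ' ' = ':') := by
              intro ⟨_, hdep, h1', h2'⟩
              exact hc ⟨(depths_eq_depthAt l i hi) ▸ hdep,
                (starts2_iff l i hi).mpr ⟨h1', h2'⟩⟩
            simp only [if_neg hne]
          · rw [cutsC_stop l i _ (by omega), cutsC_stop l (i + 1) _ (by omega)]
        rw [hsame]
    · simp only [if_neg hi]
      rw [cutsC_stop l i _ (by omega), partsGo]

-- ===== VERDICT (by name: the statement is the Claim_ definition above) =====
theorem split_namespace_and_symbol_spec : Claim_equal_split_namespace_and_symbol := by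
  intro s _
  unfold Spec_split_namespace_and_symbol
  show split_namespace_and_symbol s = split_namespace_and_symbol_alt s
  have hA := altGo_eq_splitGo s.toList s.toList.length (s.toList.length + 1) 0 0 0 []
    (by omega) (by omega)
  have hB := altGo_eq_staged s.toList s.toList.length 0 0 [] (by omega) (by omega)
  rw [depthAt_zero] at hB
  rw [hB] at hA
  rw [split_namespace_and_symbol, split_namespace_and_symbol_alt]
  unfold find_at_depth_zero
  rw [← hA]
  unfold cutsC
  norm_num
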